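-- pv_equiv track=rewrite | github.com/vlelyavin/seoapp | app/analyzers/duplicates.py | _group_pairs
-- ===== SOURCE A (Python) =====
-- from typing import Any, Dict, List, Set, Tuple
--
-- def _group_pairs(pairs: List[Tuple[str, str, float]]) -> List[Set[str]]:
--     """Group URLs connected through duplicate pairs."""
--     parent: Dict[str, str] = {}
--
--     def find(x: str) -> str:
--         while parent.get(x, x) != x:
--             parent[x] = parent.get(parent[x], parent[x])
--             x = parent[x]
--         return x
--
--     def union(x: str, y: str) -> None:
--         rx, ry = find(x), find(y)
--         if rx != ry:
--             parent[rx] = ry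
--
--     for url_a, url_b, _ in pairs:
--         parent.setdefault(url_a, url_a)
--         parent.setdefault(url_b, url_b)
--         union(url_a, url_b)
--
--     groups: Dict[str, Set[str]] = {}
--     for url in parent:
--         root = find(url)
--         groups.setdefault(root, set()).add(url)
--
--     return [group for group in groups.values() if len(group) > 1]
-- ===== SOURCE B (Python) =====
-- from typing import Dict, List, Set, Tuple
--
-- def _group_pairs(pairs: List[Tuple[str, str, float]]) -> List[Set[str]]:
--     """Group URLs connected through duplicate pairs (component labelling with relabel-on-merge)."""
--     label: Dict[str, int] = {}
--     next_id = 0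
--     for url_a, url_b, _ in pairs:
--         for u in (url_a, url_b):
--             if u not in label:
--                 label[u] = next_id
--                 next_id += 1
--         la, lb = label[url_a], label[url_b]
--         if la != lb:
--             for u in label:
--                 if label[u] == la:
--                     label[u] = lb
--     groups: Dict[int, Set[str]] = {}
--     for url in label:
--         groups.setdefault(label[url], set()).add(url)
--     return [g for g in groups.values() if len(g) > 1]
-- ===== Notes on version B (the rewrite author's own statement) =====
-- stated objective: simpler
-- what changed: Replaces the union-find forest (parent pointers, find with path halving, union by root redirection) by direct component labelling: each URL carries a component id, merging relabels the smaller pair's class in one scan, so the nested parent-chasing while-loops disappear.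
import Mathlib
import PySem

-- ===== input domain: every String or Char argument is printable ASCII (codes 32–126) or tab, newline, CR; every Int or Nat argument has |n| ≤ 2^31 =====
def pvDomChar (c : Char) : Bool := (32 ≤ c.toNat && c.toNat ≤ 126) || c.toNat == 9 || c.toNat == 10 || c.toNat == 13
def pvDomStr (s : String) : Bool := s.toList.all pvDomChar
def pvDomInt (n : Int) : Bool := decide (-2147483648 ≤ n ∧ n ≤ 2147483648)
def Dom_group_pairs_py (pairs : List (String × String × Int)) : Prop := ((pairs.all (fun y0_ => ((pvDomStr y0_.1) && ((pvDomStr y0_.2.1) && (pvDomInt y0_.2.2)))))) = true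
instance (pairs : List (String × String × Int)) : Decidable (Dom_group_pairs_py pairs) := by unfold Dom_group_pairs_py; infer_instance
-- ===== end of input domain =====

-- B replaces A's union-find (parent forest, find with path halving) by direct component
-- labelling with a relabel-on-merge scan: simpler, no nested parent-chasing loops.

-- ===== PORT A =====
-- find(x): 'while parent.get(x, x) != x: parent[x] = parent.get(parent[x], parent[x]); x = parent[x]'.
-- The fuel argument only makes the while loop total; on every state A builds it, parent.size + 1
-- steps suffice (proved below via the depth measure of the invariant).
def pyFind (fuel : Nat) (P : PySem.Dict String String) (x : String) :
    PySem.Dict String String × String :=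
  match fuel with
  | 0 => (P, x)
  | fuel + 1 =>
    let p := P.getD x x
    if p = x then (P, x)
    else
      let g := P.getD p p
      pyFind fuel (P.insert x g) g

-- union(x, y): rx, ry = find(x), find(y); if rx != ry: parent[rx] = ry
def unionA (P : PySem.Dict String String) (a b : String) : PySem.Dict String String :=
  let r1 := pyFind (P.size + 1) P a
  let r2 := pyFind (r1.1.size + 1) r1.1 b
  if r1.2 ≠ r2.2 then r2.1.insert r1.2 r2.2 else r2.1

-- one iteration of 'for url_a, url_b, _ in pairs'
def stepA (P : PySem.Dict String String) (a b : String) : PySem.Dict String String :=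
  unionA ((P.setdefault a a).setdefault b b) a b

-- one iteration of 'for url in parent: groups.setdefault(find(url), set()).add(url)'
def groupStepA (st : PySem.Dict String (PySem.Set String) × PySem.Dict String String)
    (url : String) : PySem.Dict String (PySem.Set String) × PySem.Dict String String :=
  let r := pyFind (st.2.size + 1) st.2 url
  (st.1.insert r.2 (PySem.Set.add (st.1.getD r.2 PySem.Set.empty) url), r.1)

def group_pairs_py (pairs : List (String × String × Int)) : List (List String) :=
  let parent := pairs.foldl (fun P t => stepA P t.1 t.2.1) PySem.Dict.empty
  let st := parent.keys.foldl groupStepA ((PySem.Dict.empty : PySem.Dict String (PySem.Set String)), parent)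
  st.1.values.filter (fun g => decide (1 < PySem.Set.len g))

-- ===== PORT B =====
-- one iteration of B's 'for url_a, url_b, _ in pairs'
def stepB (st : PySem.Dict String Int × Int) (a b : String) : PySem.Dict String Int × Int :=
  let st1 := if st.1.contains a then st else (st.1.insert a st.2, st.2 + 1)
  let st2 := if st1.1.contains b then st1 else (st1.1.insert b st1.2, st1.2 + 1)
  let L := st2.1
  let la := L.getD a 0
  let lb := L.getD b 0
  if la ≠ lb then
    (L.keys.foldl (fun M u => if M.getD u 0 = la then M.insert u lb else M) L, st2.2)
  else st2

-- one iteration of 'for url in label: groups.setdefault(label[url], set()).add(url)'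
def groupStepB (L : PySem.Dict String Int) (G : PySem.Dict Int (PySem.Set String))
    (url : String) : PySem.Dict Int (PySem.Set String) :=
  let l := L.getD url 0
  G.insert l (PySem.Set.add (G.getD l PySem.Set.empty) url)

def group_pairs_py_alt (pairs : List (String × String × Int)) : List (List String) :=
  let st := pairs.foldl (fun st t => stepB st t.1 t.2.1) ((PySem.Dict.empty : PySem.Dict String Int), (0 : Int))
  let G := st.1.keys.foldl (groupStepB st.1) (PySem.Dict.empty : PySem.Dict Int (PySem.Set String))
  G.values.filter (fun g => decide (1 < PySem.Set.len g))

-- ===== PRECONDITION & SPEC =====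
def Spec_group_pairs_py (pairs : List (String × String × Int)) (out : List (List String)) : Prop := out = group_pairs_py_alt pairs
instance (pairs : List (String × String × Int)) (out : List (List String)) : Decidable (Spec_group_pairs_py pairs out) := by unfold Spec_group_pairs_py; infer_instance

-- ===== CLAIM (what is proved, stated in full; the proofs are below) =====
def Claim_equal_group_pairs_py : Prop := ∀ (pairs : List (String × String × Int)), Dom_group_pairs_py pairs → Spec_group_pairs_py pairs (group_pairs_py pairs)

-- ===== LEMMAS AND PROOFS =====

-- The coupling invariant between A's parent forest P and B's label dict L:
-- d is a depth measure on the forest, rt maps each label in use to the root of its class,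
-- n is B's next fresh id.  Each key x has a parent p with the same label, p is the root
-- of x's class iff p = x, depth strictly drops along parent edges, roots have depth 0,
-- and the depth is below the size of x's class (which bounds find's fuel).
def InvD (P : PySem.Dict String String) (L : PySem.Dict String Int)
    (d : String → Nat) (rt : Int → String) (n : Int) : Prop :=
  ∀ x ∈ P.keys, ∃ p l, P.get? x = some p ∧ L.get? x = some l ∧
    p ∈ P.keys ∧ L.get? p = some l ∧
    (p = x ↔ x = rt l) ∧ (p = x → d x = 0) ∧ (p ≠ x → d p < d x) ∧
    d x < (P.keys.filter (fun y => decide (L.getD y 0 = l))).length ∧ l < n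

def Good (P : PySem.Dict String String) (L : PySem.Dict String Int)
    (d : String → Nat) (rt : Int → String) (n : Int) : Prop :=
  P.keys = L.keys ∧ P.keys.Nodup ∧ InvD P L d rt n

theorem find_spec (L : PySem.Dict String Int) (d : String → Nat) (rt : Int → String) (n : Int) :
    ∀ (fuel : Nat) (P : PySem.Dict String String) (x : String) (l : Int),
    Good P L d rt n → L.get? x = some l → x ∈ P.keys → d x < fuel →
    (pyFind fuel P x).2 = rt l ∧ (pyFind fuel P x).1.keys = P.keys ∧
    Good (pyFind fuel P x).1 L d rt n ∧
    rt l ∈ P.keys ∧ L.get? (rt l) = some l ∧ P.get? (rt l) = some (rt l) := by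
  intro fuel
  induction fuel with
  | zero => intro P x l _ _ _ hd; omega
  | succ f ih =>
    intro P x l hG hl hx hd
    obtain ⟨hk, hnd, hI⟩ := hG
    obtain ⟨p, l', hPx, hLx, hpk, hLp, hiff, hroot0, hlt, hcls, hln⟩ := hI x hx
    have hLx' := hLx
    rw [hl] at hLx'
    have hll : l = l' := Option.some.inj hLx'
    subst hll
    have e1 : P.getD x x = p := by rw [PySem.Dict.getD_eq_get?_getD, hPx]; rfl
    by_cases hpx : p = x
    · have hxr : x = rt l := hiff.mp hpx
      have hrun : pyFind (f + 1) P x = (P, x) := by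
        simp only [pyFind, e1, if_pos hpx]
      rw [hrun]
      exact ⟨hxr, rfl, ⟨hk, hnd, hI⟩, hxr ▸ hx, hxr ▸ hl, hxr ▸ (hpx ▸ hPx)⟩
    · obtain ⟨pp, lp, hPp, hLp2, hppk, hLpp, hiffp, hroot0p, hltp, hclsp, hlnp⟩ := hI p hpk
      have hLp2' := hLp2
      rw [hLp] at hLp2'
      have hlp : l = lp := Option.some.inj hLp2'
      subst hlp
      have e2 : P.getD p p = pp := by rw [PySem.Dict.getD_eq_get?_getD, hPp]; rfl
      have hdpp : d pp < d x := by
        by_cases hppp : pp = p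
        · rw [hppp]; exact hlt hpx
        · exact lt_trans (hltp hppp) (hlt hpx)
      have hppx : pp ≠ x := by
        intro h; rw [h] at hdpp; omega
      have hxnr : x ≠ rt l := by
        intro h; exact hpx (hiff.mpr h)
      have hcont : P.contains x = true := (PySem.Dict.contains_iff_mem_keys P x).mpr hx
      have hkeys' : (P.insert x pp).keys = P.keys := PySem.Dict.keys_insert_of_contains P pp hcont
      have hG' : Good (P.insert x pp) L d rt n := by
        refine ⟨by rw [hkeys']; exact hk, by rw [hkeys']; exact hnd, ?_⟩
        intro y hy
        rw [hkeys'] at hy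
        by_cases hyx : y = x
        · subst hyx
          refine ⟨pp, l, PySem.Dict.get?_insert_self P y pp, hLx, ?_, hLpp, ?_, ?_, ?_, ?_, hln⟩
          · rw [hkeys']; exact hppk
          · constructor
            · intro h; exact absurd h hppx
            · intro h; exact absurd h hxnr
          · intro h; exact absurd h hppx
          · intro _; exact hdpp
          · rw [hkeys']; exact hcls
        · obtain ⟨q, m, hq1, hq2, hq3, hq4, hq5, hq6, hq7, hq8, hq9⟩ := hI y hy
          exact ⟨q, m, by rw [PySem.Dict.get?_insert_of_ne P pp hyx]; exact hq1, hq2,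
            by rw [hkeys']; exact hq3, hq4, hq5, hq6, hq7, by rw [hkeys']; exact hq8, hq9⟩
      have hrun : pyFind (f + 1) P x = pyFind f (P.insert x pp) pp := by
        simp only [pyFind, e1, if_neg hpx, e2]
      have hmem' : pp ∈ (P.insert x pp).keys := by rw [hkeys']; exact hppk
      have hdf : d pp < f := by omega
      obtain ⟨c1, c2, c3, c4, c5, c6⟩ := ih (P.insert x pp) pp l hG' hLpp hmem' hdf
      rw [hkeys'] at c4
      refine ⟨by rw [hrun]; exact c1, by rw [hrun, c2]; exact hkeys', by rw [hrun]; exact c3,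
        c4, c5, ?_⟩
      rw [PySem.Dict.get?_insert_of_ne P pp (fun h => hxnr h.symm)] at c6
      exact c6


theorem setdefault_eq {ν : Type} (d : PySem.Dict String ν) (k : String) (v : ν) :
    d.setdefault k v = if d.contains k = true then d else d.insert k v := by
  by_cases h : d.contains k = true
  · simp [PySem.Dict.setdefault, h]
  · apply PySem.Dict.ext
    simp only [PySem.Dict.setdefault, if_neg h]
    rw [PySem.Dict.items_insert, if_neg (by simpa using h)]

theorem keys_length_eq_size {κ ν : Type} (d : PySem.Dict κ ν) : d.keys.length = d.size := by
  simp [PySem.Dict.keys, PySem.Dict.size]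

theorem depth_lt_size (P : PySem.Dict String String) (L : PySem.Dict String Int)
    (d : String → Nat) (rt : Int → String) (n : Int) (x : String)
    (hG : Good P L d rt n) (hx : x ∈ P.keys) : d x < P.size := by
  obtain ⟨hk, hnd, hI⟩ := hG
  obtain ⟨p, l, _, _, _, _, _, _, _, hcls, _⟩ := hI x hx
  calc d x < (P.keys.filter (fun y => decide (L.getD y 0 = l))).length := hcls
    _ ≤ P.keys.length := List.length_filter_le _ _
    _ = P.size := keys_length_eq_size P

-- adding one fresh key (setdefault a a on A's side / label[a] = next_id on B's side)
theorem addkey_spec (P : PySem.Dict String String) (L : PySem.Dict String Int)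
    (d : String → Nat) (rt : Int → String) (n : Int) (a : String)
    (hG : Good P L d rt n) :
    ∃ d' rt', Good (P.setdefault a a) (if L.contains a = true then L else L.insert a n)
      d' rt' (if L.contains a = true then n else n + 1) := by
  obtain ⟨hk, hnd, hI⟩ := hG
  by_cases hc : L.contains a = true
  · have hcP : P.contains a = true := by
      rw [PySem.Dict.contains_iff_mem_keys, hk, ← PySem.Dict.contains_iff_mem_keys]; exact hc
    rw [setdefault_eq, if_pos hcP, if_pos hc, if_pos hc]
    exact ⟨d, rt, hk, hnd, hI⟩
  · have hcP : ¬ P.contains a = true := by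
      rw [PySem.Dict.contains_iff_mem_keys, hk, ← PySem.Dict.contains_iff_mem_keys]; exact hc
    have hna : a ∉ P.keys := fun h => hcP ((PySem.Dict.contains_iff_mem_keys P a).mpr h)
    have hnaL : a ∉ L.keys := by rw [← hk]; exact hna
    rw [setdefault_eq, if_neg hcP, if_neg hc, if_neg hc]
    refine ⟨Function.update d a 0, Function.update rt n a, ?_, ?_, ?_⟩
    · rw [PySem.Dict.keys_insert_of_not_contains P a (by simpa using hcP),
        PySem.Dict.keys_insert_of_not_contains L n (by simpa using hc), hk]
    · rw [PySem.Dict.keys_insert_of_not_contains P a (by simpa using hcP)]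
      simp [List.nodup_append, hnd]
      intro z hz h
      exact hna (h ▸ hz)
    · intro y hy
      rw [PySem.Dict.keys_insert_of_not_contains P a (by simpa using hcP)] at hy
      have hkeysP : (P.insert a a).keys = P.keys ++ [a] :=
        PySem.Dict.keys_insert_of_not_contains P a (by simpa using hcP)
      rcases List.mem_append.mp hy with hyP | hya
      · -- old key
        have hyna : y ≠ a := fun h => hna (h ▸ hyP)
        obtain ⟨p, l, h1, h2, h3, h4, h5, h6, h7, h8, h9⟩ := hI y hyP
        have hpna : p ≠ a := fun h => hna (h ▸ h3)
        have hln : l ≠ n := by omega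
        refine ⟨p, l, ?_, ?_, ?_, ?_, ?_, ?_, ?_, ?_, by omega⟩
        · rw [PySem.Dict.get?_insert_of_ne P a hyna]; exact h1
        · rw [PySem.Dict.get?_insert_of_ne L n hyna]; exact h2
        · rw [hkeysP]; exact List.mem_append_left _ h3
        · rw [PySem.Dict.get?_insert_of_ne L n hpna]; exact h4
        · rw [Function.update_of_ne hln]; exact h5
        · intro h; rw [Function.update_of_ne hyna]; exact h6 h
        · intro h; rw [Function.update_of_ne hpna, Function.update_of_ne hyna]; exact h7 h
        · rw [Function.update_of_ne hyna, hkeysP, List.filter_append]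
          have : List.filter (fun y => decide ((L.insert a n).getD y 0 = l)) P.keys
              = List.filter (fun y => decide (L.getD y 0 = l)) P.keys := by
            apply List.filter_congr
            intro z hz
            have hzna : z ≠ a := fun h => hna (h ▸ hz)
            rw [PySem.Dict.getD_insert, if_neg hzna]
          rw [this, List.length_append]
          omega
      · -- the new key a
        have hya' : y = a := by simpa using hya
        subst hya'
        refine ⟨y, n, PySem.Dict.get?_insert_self P y y, PySem.Dict.get?_insert_self L y n,
          ?_, PySem.Dict.get?_insert_self L y n, ?_, ?_, ?_, ?_, by omega⟩
        · rw [hkeysP]; exact List.mem_append_right _ (by simp)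
        · simp [Function.update_self]
        · intro _; simp [Function.update_self]
        · intro h; exact absurd rfl h
        · rw [Function.update_self, hkeysP, List.filter_append, List.length_append]
          have : 0 < (List.filter (fun z => decide ((L.insert y n).getD z 0 = n)) [y]).length := by
            simp [PySem.Dict.getD_insert]
          omega


theorem filter_or_length {α : Type} (p q : α → Bool) :
    ∀ (xs : List α), (∀ x ∈ xs, ¬(p x = true ∧ q x = true)) →
    (xs.filter (fun x => p x || q x)).length = (xs.filter p).length + (xs.filter q).length := by
  intro xs
  induction xs with
  | nil => intro _; simp
  | cons x t ih =>
    intro h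
    have ht := ih (fun z hz => h z (by simp [hz]))
    rw [List.filter_cons, List.filter_cons, List.filter_cons]
    by_cases hp : p x = true
    · have hq : ¬ q x = true := fun hq => h x (by simp) ⟨hp, hq⟩
      simp [hp, hq, ht]
      omega
    · by_cases hq : q x = true <;> simp [hp, hq, ht] <;> omega

-- B's relabel scan: 'for u in label: if label[u] == la: label[u] = lb'
theorem relabel_spec (la lb : Int) (L0 : PySem.Dict String Int) :
    ∀ (ks : List String) (M : PySem.Dict String Int),
    ks.Nodup → (∀ u ∈ ks, M.get? u = L0.get? u) → M.keys = L0.keys →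
    (∀ u ∈ ks, u ∈ L0.keys) →
    (ks.foldl (fun M u => if M.getD u 0 = la then M.insert u lb else M) M).keys = M.keys ∧
    ∀ y, (ks.foldl (fun M u => if M.getD u 0 = la then M.insert u lb else M) M).get? y =
      if y ∈ ks ∧ L0.getD y 0 = la then some lb else M.get? y := by
  intro ks
  induction ks with
  | nil => intro M _ _ _ _; simp
  | cons u t ih =>
    intro M hnd hagree hkeys hmem
    have hut : u ∉ t := (List.nodup_cons.mp hnd).1
    have htnd : t.Nodup := (List.nodup_cons.mp hnd).2
    have huL0 : u ∈ L0.keys := hmem u (by simp)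
    have huM : u ∈ M.keys := by rw [hkeys]; exact huL0
    have hgd : M.getD u 0 = L0.getD u 0 := by
      rw [PySem.Dict.getD_eq_get?_getD, PySem.Dict.getD_eq_get?_getD, hagree u (by simp)]
    set M1 := if M.getD u 0 = la then M.insert u lb else M with hM1
    have hM1keys : M1.keys = M.keys := by
      rw [hM1]
      split
      · exact PySem.Dict.keys_insert_of_contains M lb ((PySem.Dict.contains_iff_mem_keys M u).mpr huM)
      · rfl
    have hM1get : ∀ y, y ≠ u → M1.get? y = M.get? y := by
      intro y hy
      rw [hM1]
      split
      · exact PySem.Dict.get?_insert_of_ne M lb hy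
      · rfl
    have hfold : (u :: t).foldl (fun M u => if M.getD u 0 = la then M.insert u lb else M) M
        = t.foldl (fun M u => if M.getD u 0 = la then M.insert u lb else M) M1 := by
      rw [List.foldl_cons]
    obtain ⟨ihk, ihg⟩ := ih M1 htnd
      (fun v hv => by rw [hM1get v (fun h => hut (h ▸ hv))]; exact hagree v (by simp [hv]))
      (by rw [hM1keys]; exact hkeys)
      (fun v hv => hmem v (by simp [hv]))
    refine ⟨by rw [hfold, ihk, hM1keys], ?_⟩
    intro y
    rw [hfold, ihg y]
    by_cases hyu : y = u
    · subst hyu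
      rw [if_neg (fun h => hut h.1)]
      by_cases hla : L0.getD y 0 = la
      · rw [if_pos ⟨by simp, hla⟩, hM1, hgd, if_pos hla]
        exact PySem.Dict.get?_insert_self M y lb
      · rw [if_neg (fun h => hla h.2), hM1, hgd, if_neg hla]
    · by_cases hyt : y ∈ t ∧ L0.getD y 0 = la
      · rw [if_pos hyt, if_pos ⟨by simp [hyt.1], hyt.2⟩]
      · rw [if_neg hyt, hM1get y hyu]
        have : ¬(y ∈ u :: t ∧ L0.getD y 0 = la) := by
          intro ⟨h1, h2⟩
          rcases List.mem_cons.mp h1 with h | h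
          · exact hyu h
          · exact hyt ⟨h, h2⟩
        rw [if_neg this]


-- A's 'parent[rx] = ry' coupled with B's relabel of class la to lb
theorem merge_spec (P : PySem.Dict String String) (L : PySem.Dict String Int)
    (d : String → Nat) (rt : Int → String) (n la lb : Int) (rx ry : String)
    (hG : Good P L d rt n) (hlab : la ≠ lb)
    (hrx : rx = rt la) (hry : ry = rt lb)
    (hrxk : rx ∈ P.keys) (hryk : ry ∈ P.keys)
    (hLrx : L.get? rx = some la) (hLry : L.get? ry = some lb)
    (hPry : P.get? ry = some ry) :
    Good (P.insert rx ry)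
      (L.keys.foldl (fun M u => if M.getD u 0 = la then M.insert u lb else M) L)
      (fun y => if L.getD y 0 = la then d y + 1 else d y) rt n := by
  obtain ⟨hk, hnd, hI⟩ := hG
  have hndL : L.keys.Nodup := hk ▸ hnd
  obtain ⟨hLk', hLg'⟩ := relabel_spec la lb L L.keys L hndL (fun _ _ => rfl) rfl (fun _ h => h)
  set L' := L.keys.foldl (fun M u => if M.getD u 0 = la then M.insert u lb else M) L with hL'
  have hrxry : rx ≠ ry := by
    intro h
    rw [h, hLry] at hLrx
    exact hlab (Option.some.inj hLrx).symm
  have hcontrx : P.contains rx = true := (PySem.Dict.contains_iff_mem_keys P rx).mpr hrxk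
  have hPk' : (P.insert rx ry).keys = P.keys := PySem.Dict.keys_insert_of_contains P ry hcontrx
  -- get? of L' on keys
  have hget' : ∀ z m, z ∈ L.keys → L.get? z = some m →
      L'.get? z = some (if m = la then lb else m) := by
    intro z m hz hm
    rw [hLg' z]
    have : L.getD z 0 = m := by rw [PySem.Dict.getD_eq_get?_getD, hm]; rfl
    by_cases hm' : m = la
    · rw [if_pos ⟨hz, by rw [this, hm']⟩, if_pos hm']
    · rw [if_neg (fun h => hm' (by rw [this] at h; exact h.2)), if_neg hm', hm]
  have hsome : ∀ z ∈ P.keys, ∃ m, L.get? z = some m ∧ m < n := by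
    intro z hz
    obtain ⟨_, m, _, h2, _, _, _, _, _, _, h9⟩ := hI z hz
    exact ⟨m, h2, h9⟩
  -- the merged class size
  have hnewlen : ∀ m, m ≠ la → (P.keys.filter (fun z => decide (L'.getD z 0 = m))).length =
      (if m = lb then (P.keys.filter (fun z => decide (L.getD z 0 = la))).length else 0) +
      (P.keys.filter (fun z => decide (L.getD z 0 = m))).length := by
    intro m hmla
    by_cases hm : m = lb
    · subst hm
      have hcongr : P.keys.filter (fun z => decide (L'.getD z 0 = m)) =
          P.keys.filter (fun z => decide (L.getD z 0 = la) || decide (L.getD z 0 = m)) := by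
        apply List.filter_congr
        intro z hz
        obtain ⟨w, hw, _⟩ := hsome z hz
        have hzget : L.getD z 0 = w := by rw [PySem.Dict.getD_eq_get?_getD, hw]; rfl
        have hzget' : L'.getD z 0 = if w = la then m else w := by
          rw [PySem.Dict.getD_eq_get?_getD, hget' z w (hk ▸ hz) hw]; rfl
        rw [hzget, hzget']
        by_cases hwla : w = la
        · simp [hwla, hlab]
        · simp [hwla]
      rw [hcongr, if_pos rfl,
        filter_or_length _ _ P.keys (fun z _ h => hlab (by
          have := h.1; have := h.2
          simp only [decide_eq_true_eq] at *
          omega))]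
    · rw [if_neg hm, Nat.zero_add]
      congr 1
      apply List.filter_congr
      intro z hz
      obtain ⟨w, hw, _⟩ := hsome z hz
      have hzget : L.getD z 0 = w := by rw [PySem.Dict.getD_eq_get?_getD, hw]; rfl
      have hzget' : L'.getD z 0 = if w = la then lb else w := by
        rw [PySem.Dict.getD_eq_get?_getD, hget' z w (hk ▸ hz) hw]; rfl
      rw [hzget, hzget']
      by_cases hwla : w = la
      · simp [hwla, Ne.symm hm, Ne.symm hmla]
      · simp [hwla]
  have hryd0 : d ry = 0 := by
    obtain ⟨q, m, h1, _, _, _, _, h6, _, _, _⟩ := hI ry hryk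
    rw [hPry] at h1
    exact h6 (Option.some.inj h1).symm
  have hlenB : 0 < (P.keys.filter (fun z => decide (L.getD z 0 = lb))).length := by
    have : ry ∈ P.keys.filter (fun z => decide (L.getD z 0 = lb)) := by
      rw [List.mem_filter]
      refine ⟨hryk, by rw [PySem.Dict.getD_eq_get?_getD, hLry]; simp⟩
    exact List.length_pos_of_mem this
  refine ⟨by rw [hPk', hLk', hk], by rw [hPk']; exact hnd, ?_⟩
  intro y hy
  rw [hPk'] at hy
  obtain ⟨p, l, h1, h2, h3, h4, h5, h6, h7, h8, h9⟩ := hI y hy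
  have hgdy : L.getD y 0 = l := by rw [PySem.Dict.getD_eq_get?_getD, h2]; rfl
  have hgdp : L.getD p 0 = l := by rw [PySem.Dict.getD_eq_get?_getD, h4]; rfl
  by_cases hyl : l = la
  · subst hyl
    by_cases hyrx : y = rx
    · subst hyrx
      -- the root of the absorbed class: parent edge rx → ry, label la → lb
      refine ⟨ry, lb, ?_, ?_, ?_, ?_, ?_, ?_, ?_, ?_, ?_⟩
      · exact PySem.Dict.get?_insert_self P y ry
      · rw [hget' y l (hk ▸ hy) h2, if_pos rfl]
      · rw [hPk']; exact hryk
      · rw [hget' ry lb (hk ▸ hryk) hLry, if_neg (Ne.symm hlab)]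
      · constructor
        · intro h; exact absurd h.symm hrxry
        · intro h; rw [← hry] at h; exact absurd h hrxry
      · intro h; exact absurd h.symm hrxry
      · intro _
        have hgdr : L.getD ry 0 = lb := by rw [PySem.Dict.getD_eq_get?_getD, hLry]; rfl
        simp [hgdr, Ne.symm hlab, hgdy, hryd0]
      · rw [hPk', hnewlen lb (Ne.symm hlab), if_pos rfl]
        simp [hgdy]
        have := hlenB
        have := h8
        omega
      · exact (hsome ry hryk).elim (fun m hm => by
          rw [hLry] at hm; exact (Option.some.inj hm.1) ▸ hm.2)
    · -- non-root member of the absorbed class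
      have hpy : p ≠ y := fun h => hyrx (hrx ▸ h5.mp h)
      refine ⟨p, lb, ?_, ?_, ?_, ?_, ?_, ?_, ?_, ?_, ?_⟩
      · rw [PySem.Dict.get?_insert_of_ne P ry hyrx]; exact h1
      · rw [hget' y l (hk ▸ hy) h2, if_pos rfl]
      · rw [hPk']; exact h3
      · rw [hget' p l (hk ▸ h3) h4, if_pos rfl]
      · constructor
        · intro h; exact absurd h hpy
        · intro h
          rw [← hry] at h
          rw [h, hLry] at h2
          exact absurd (Option.some.inj h2).symm hlab
      · intro h; exact absurd h hpy
      · intro _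
        simp [hgdy, hgdp]
        exact h7 hpy
      · rw [hPk', hnewlen lb (Ne.symm hlab), if_pos rfl]
        simp [hgdy]
        have := hlenB
        have := h8
        omega
      · exact (hsome ry hryk).elim (fun m hm => by
          rw [hLry] at hm; exact (Option.some.inj hm.1) ▸ hm.2)
  · -- classes other than la are untouched
    have hyrx : y ≠ rx := by
      intro h; rw [h, hLrx] at h2; exact hyl (Option.some.inj h2).symm
    have hprx : p ≠ rx := by
      intro h; rw [h, hLrx] at h4; exact hyl (Option.some.inj h4).symm
    refine ⟨p, l, ?_, ?_, ?_, ?_, ?_, ?_, ?_, ?_, h9⟩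
    · rw [PySem.Dict.get?_insert_of_ne P ry hyrx]; exact h1
    · rw [hget' y l (hk ▸ hy) h2, if_neg hyl]
    · rw [hPk']; exact h3
    · rw [hget' p l (hk ▸ h3) h4, if_neg hyl]
    · exact h5
    · intro h
      simp only [hgdy, if_neg hyl]
      exact h6 h
    · intro h
      simp only [hgdy, hgdp, if_neg hyl]
      exact h7 h
    · rw [hPk', hnewlen l hyl]
      simp only [hgdy, if_neg hyl]
      by_cases hlb : l = lb
      · rw [if_pos hlb]; omega
      · rw [if_neg hlb]; omega


theorem mem_keys_setdefault {ν : Type} (dct : PySem.Dict String ν) (k z : String) (v : ν)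
    (hz : z ∈ dct.keys) : z ∈ (dct.setdefault k v).keys := by
  rw [setdefault_eq]
  split
  · exact hz
  · next h =>
    rw [PySem.Dict.keys_insert_of_not_contains dct v (by simpa using h)]
    exact List.mem_append_left _ hz

theorem self_mem_keys_setdefault {ν : Type} (dct : PySem.Dict String ν) (k : String) (v : ν) :
    k ∈ (dct.setdefault k v).keys := by
  rw [setdefault_eq]
  split
  · next h => exact (PySem.Dict.contains_iff_mem_keys dct k).mp h
  · next h =>
    rw [PySem.Dict.keys_insert_of_not_contains dct v (by simpa using h)]
    exact List.mem_append_right _ (by simp)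

-- one pair of A's main loop coupled with one pair of B's main loop
theorem step_spec (P : PySem.Dict String String) (L : PySem.Dict String Int)
    (d : String → Nat) (rt : Int → String) (n : Int) (a b : String)
    (hG : Good P L d rt n) :
    ∃ d' rt', Good (stepA P a b) (stepB (L, n) a b).1 d' rt' (stepB (L, n) a b).2 := by
  obtain ⟨d1, rt1, hG1⟩ := addkey_spec P L d rt n a hG
  obtain ⟨d2, rt2, hG2⟩ := addkey_spec (P.setdefault a a)
    (if L.contains a = true then L else L.insert a n) d1 rt1
    (if L.contains a = true then n else n + 1) b hG1
  set P2 := (P.setdefault a a).setdefault b b with hP2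
  set L2 := (if (if L.contains a = true then L else L.insert a n).contains b = true then
      (if L.contains a = true then L else L.insert a n) else
      (if L.contains a = true then L else L.insert a n).insert b
        (if L.contains a = true then n else n + 1)) with hL2
  set n2 := (if (if L.contains a = true then L else L.insert a n).contains b = true then
      (if L.contains a = true then n else n + 1) else
      (if L.contains a = true then n else n + 1) + 1) with hn2
  have hst2 : ((fun st => if (st : PySem.Dict String Int × Int).1.contains b = true then st
        else (st.1.insert b st.2, st.2 + 1))
      (if L.contains a = true then (L, n) else (L.insert a n, n + 1))) = (L2, n2) := by
    by_cases h1 : L.contains a = true <;> by_cases h2 : (if L.contains a = true then L else L.insert a n).contains b = true <;>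
      simp [h1, hL2, hn2] <;> simp [h1] at h2 <;> simp [h2]
  have hGood2 : Good P2 L2 d2 rt2 n2 := hG2
  -- membership of a and b in P2
  have hbP2 : b ∈ P2.keys := self_mem_keys_setdefault _ b b
  have haP2 : a ∈ P2.keys := mem_keys_setdefault _ b a b (self_mem_keys_setdefault P a a)
  -- labels of a and b
  obtain ⟨hk2, hnd2, hI2⟩ := hG2
  obtain ⟨pa, la, _, hLa, _, _, _, _, _, _, hlan⟩ := hI2 a haP2
  obtain ⟨pb, lb, _, hLb, _, _, _, _, _, _, hlbn⟩ := hI2 b hbP2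
  have hgda : L2.getD a 0 = la := by rw [PySem.Dict.getD_eq_get?_getD, hLa]; rfl
  have hgdb : L2.getD b 0 = lb := by rw [PySem.Dict.getD_eq_get?_getD, hLb]; rfl
  -- first find
  have hda : d2 a < P2.size + 1 :=
    Nat.lt_succ_of_lt (depth_lt_size P2 L2 d2 rt2 n2 a hGood2 haP2)
  obtain ⟨f1a, f1b, hGood3, hrxk, hLrx, _⟩ :=
    find_spec L2 d2 rt2 n2 (P2.size + 1) P2 a la hGood2 hLa haP2 hda
  set P3 := (pyFind (P2.size + 1) P2 a).1 with hP3
  -- second find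
  have hbP3 : b ∈ P3.keys := by rw [f1b]; exact hbP2
  have hdb : d2 b < P3.size + 1 := by
    rw [← keys_length_eq_size, f1b, keys_length_eq_size]
    exact Nat.lt_succ_of_lt (depth_lt_size P2 L2 d2 rt2 n2 b hGood2 hbP2)
  obtain ⟨f2a, f2b, hGood4, hryk, hLry, _⟩ :=
    find_spec L2 d2 rt2 n2 (P3.size + 1) P3 b lb hGood3 hLb hbP3 hdb
  set P4 := (pyFind (P3.size + 1) P3 b).1 with hP4
  have hrxk4 : rt2 la ∈ P4.keys := by rw [f2b, f1b]; exact hrxk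
  have hryk4 : rt2 lb ∈ P4.keys := by rw [f2b]; exact hryk
  -- root of b's class is its own parent in P4
  have hPry : P4.get? (rt2 lb) = some (rt2 lb) := by
    obtain ⟨_, _, hIn4⟩ := hGood4
    obtain ⟨q, m, j1, j2, _, _, j5, _, _, _, _⟩ := hIn4 (rt2 lb) hryk4
    have hm : m = lb := by rw [hLry] at j2; exact (Option.some.inj j2).symm
    subst hm
    rw [j5.mpr rfl] at j1
    exact j1
  -- the two branch conditions agree
  have hcond : (pyFind (P2.size + 1) P2 a).2 ≠ (pyFind (P3.size + 1) P3 b).2 ↔ ¬ la = lb := by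
    rw [f1a, f2a]
    constructor
    · intro h hl; exact h (by rw [hl])
    · intro h hrt
      rw [hrt, hLry] at hLrx
      exact h (Option.some.inj hLrx).symm
  -- assemble
  have hstepB : stepB (L, n) a b =
      (if L2.getD a 0 ≠ L2.getD b 0 then
        (L2.keys.foldl (fun M u =>
          if M.getD u 0 = L2.getD a 0 then M.insert u (L2.getD b 0) else M) L2, n2)
      else (L2, n2)) := by
    by_cases h1 : L.contains a = true <;>
      [by_cases h2 : L.contains b = true;
       by_cases h2 : (L.insert a n).contains b = true] <;>
      simp [stepB, hL2, hn2, h1, h2, apply_ite Prod.fst, apply_ite Prod.snd]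
  rw [hgda, hgdb] at hstepB
  rw [hstepB]
  have hstepA : stepA P a b =
      (if (pyFind (P2.size + 1) P2 a).2 ≠ (pyFind (P3.size + 1) P3 b).2 then
        P4.insert (pyFind (P2.size + 1) P2 a).2 (pyFind (P3.size + 1) P3 b).2 else P4) := rfl
  rw [hstepA]
  by_cases hl : la = lb
  · rw [if_neg (by simpa [hcond] using hl), if_neg (by simp [hl])]
    exact ⟨d2, rt2, hGood4⟩
  · rw [if_pos (hcond.mpr hl), if_pos (by simpa using hl), f1a, f2a]
    exact ⟨_, rt2, merge_spec P4 L2 d2 rt2 n2 la lb (rt2 la) (rt2 lb) hGood4 hl rfl rfl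
      hrxk4 hryk4 hLrx hLry hPry⟩


theorem fold_good : ∀ (pairs : List (String × String × Int)) (P : PySem.Dict String String)
    (L : PySem.Dict String Int) (d : String → Nat) (rt : Int → String) (n : Int),
    Good P L d rt n →
    ∃ d' rt', Good (pairs.foldl (fun P t => stepA P t.1 t.2.1) P)
      ((pairs.foldl (fun st t => stepB st t.1 t.2.1) (L, n)).1) d' rt'
      ((pairs.foldl (fun st t => stepB st t.1 t.2.1) (L, n)).2) := by
  intro pairs
  induction pairs with
  | nil => intro P L d rt n h; exact ⟨d, rt, h⟩
  | cons t ts ih =>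
    intro P L d rt n h
    obtain ⟨d1, rt1, h1⟩ := step_spec P L d rt n t.1 t.2.1 h
    simpa using ih (stepA P t.1 t.2.1) (stepB (L, n) t.1 t.2.1).1 d1 rt1
      (stepB (L, n) t.1 t.2.1).2 h1

-- get? through the key renaming l ↦ rt l (rt is injective on labels that L realises)
theorem get?_map_rt (L : PySem.Dict String Int) (rt : Int → String) :
    ∀ (items : List (Int × PySem.Set String)) (l : Int),
    (∀ p ∈ items, L.get? (rt p.1) = some p.1) → L.get? (rt l) = some l →
    (PySem.Dict.mk (items.map (fun p => (rt p.1, p.2)))).get? (rt l) =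
      (PySem.Dict.mk items).get? l := by
  intro items
  induction items with
  | nil => intro l _ _; rfl
  | cons q qs ih =>
    intro l hw hl
    rw [List.map_cons, PySem.Dict.get?_mk_cons, PySem.Dict.get?_mk_cons]
    by_cases hq : q.1 = l
    · rw [if_pos (by simp [hq]), if_pos (by simp [hq])]
    · have hne : rt q.1 ≠ rt l := by
        intro h
        have := hw q (by simp)
        rw [h, hl] at this
        exact hq (Option.some.inj this).symm
      rw [if_neg (by simpa using hne), if_neg (by simpa using hq)]
      exact ih l (fun p hp => hw p (by simp [hp])) hl

-- the grouping loops build rt-renamed copies of each other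
theorem gfold (L : PySem.Dict String Int) (d : String → Nat) (rt : Int → String) (n : Int) :
    ∀ (ks : List String) (P : PySem.Dict String String)
    (GA : PySem.Dict String (PySem.Set String)) (GB : PySem.Dict Int (PySem.Set String)),
    Good P L d rt n → (∀ u ∈ ks, u ∈ P.keys) →
    GA.items = GB.items.map (fun p => (rt p.1, p.2)) →
    (∀ p ∈ GB.items, L.get? (rt p.1) = some p.1) →
    (ks.foldl groupStepA (GA, P)).1.items =
      ((ks.foldl (groupStepB L) GB).items).map (fun p => (rt p.1, p.2)) := by
  intro ks
  induction ks with
  | nil => intro P GA GB _ _ hitems _; simpa using hitems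
  | cons u t ih =>
    intro P GA GB hG hks hitems hw
    have huP : u ∈ P.keys := hks u (by simp)
    have hGc := hG
    obtain ⟨hk, hnd, hI⟩ := hGc
    obtain ⟨pu, lu, _, hLu, _, _, _, _, _, _, _⟩ := hI u huP
    have hdu : d u < P.size + 1 := Nat.lt_succ_of_lt (depth_lt_size P L d rt n u hG huP)
    obtain ⟨fa, fb, hG', _, hLr, _⟩ := find_spec L d rt n (P.size + 1) P u lu hG hLu huP hdu
    -- A's step
    have hstepAeq : groupStepA (GA, P) u =
        (GA.insert (rt lu) (PySem.Set.add (GA.getD (rt lu) PySem.Set.empty) u),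
          (pyFind (P.size + 1) P u).1) := by
      simp only [groupStepA, fa]
    -- B's step
    have hgdu : L.getD u 0 = lu := by rw [PySem.Dict.getD_eq_get?_getD, hLu]; rfl
    have hstepBeq : groupStepB L GB u =
        GB.insert lu (PySem.Set.add (GB.getD lu PySem.Set.empty) u) := by
      simp only [groupStepB, hgdu]
    -- the two looked-up sets coincide
    have hget : GA.get? (rt lu) = GB.get? lu := by
      have h1 : GA.get? (rt lu) = (PySem.Dict.mk (GB.items.map (fun p => (rt p.1, p.2)))).get? (rt lu) := by
        rw [← hitems]
      rw [h1, get?_map_rt L rt GB.items lu hw hLr]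
    have hsets : GA.getD (rt lu) PySem.Set.empty = GB.getD lu PySem.Set.empty := by
      rw [PySem.Dict.getD_eq_get?_getD, PySem.Dict.getD_eq_get?_getD, hget]
    have hcont : GA.contains (rt lu) = GB.contains lu := by
      rw [PySem.Dict.contains_eq_isSome_get?, PySem.Dict.contains_eq_isSome_get?, hget]
    -- the inserted dicts stay rt-renamed copies
    set v := PySem.Set.add (GB.getD lu PySem.Set.empty) u with hv
    have hitems' : (GA.insert (rt lu) (PySem.Set.add (GA.getD (rt lu) PySem.Set.empty) u)).items =
        (GB.insert lu v).items.map (fun p => (rt p.1, p.2)) := by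
      rw [hsets, ← hv, PySem.Dict.items_insert, PySem.Dict.items_insert, hcont]
      by_cases hc : GB.contains lu = true
      · rw [if_pos hc, if_pos hc, hitems, List.map_map, List.map_map]
        apply List.map_congr_left
        intro p hp
        by_cases hpl : p.1 = lu
        · simp [Function.comp, hpl]
        · have hne : rt p.1 ≠ rt lu := by
            intro h
            have h2 := hw p hp
            rw [h, hLr] at h2
            exact hpl (Option.some.inj h2).symm
          simp [Function.comp, hpl, hne]
      · rw [if_neg hc, if_neg hc, hitems, List.map_append]
        rfl
    have hw' : ∀ p ∈ (GB.insert lu v).items, L.get? (rt p.1) = some p.1 := by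
      intro p hp
      rcases (PySem.Dict.mem_items_insert GB lu v p).mp hp with h | h
      · rw [h]; exact hLr
      · exact hw p h.1
    have hksP : ∀ z ∈ t, z ∈ (pyFind (P.size + 1) P u).1.keys := by
      intro z hz; rw [fb]; exact hks z (by simp [hz])
    calc ((u :: t).foldl groupStepA (GA, P)).1.items
        = ((t.foldl groupStepA (groupStepA (GA, P) u))).1.items := by rw [List.foldl_cons]
      _ = ((t.foldl (groupStepB L) (groupStepB L GB u)).items).map (fun p => (rt p.1, p.2)) := by
          rw [hstepAeq, hstepBeq]
          exact ih (pyFind (P.size + 1) P u).1 _ _ hG' hksP hitems' hw'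
      _ = (((u :: t).foldl (groupStepB L) GB).items).map (fun p => (rt p.1, p.2)) := by
          rw [List.foldl_cons]

theorem ab_eq (pairs : List (String × String × Int)) :
    group_pairs_py pairs = group_pairs_py_alt pairs := by
  have hG0 : Good PySem.Dict.empty PySem.Dict.empty (fun _ => 0) (fun _ => "") 0 :=
    ⟨rfl, List.nodup_nil, by intro x hx; simp [PySem.Dict.empty, PySem.Dict.keys] at hx⟩
  obtain ⟨d, rt, hG⟩ := fold_good pairs PySem.Dict.empty PySem.Dict.empty
    (fun _ => 0) (fun _ => "") 0 hG0
  set parent := pairs.foldl (fun P t => stepA P t.1 t.2.1) PySem.Dict.empty with hparent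
  set stB := pairs.foldl (fun st t => stepB st t.1 t.2.1) (PySem.Dict.empty, (0 : Int)) with hstB
  have hk : parent.keys = stB.1.keys := hG.1
  have hitems : (parent.keys.foldl groupStepA
        ((PySem.Dict.empty : PySem.Dict String (PySem.Set String)), parent)).1.items =
      ((stB.1.keys.foldl (groupStepB stB.1)
        (PySem.Dict.empty : PySem.Dict Int (PySem.Set String))).items).map (fun p => (rt p.1, p.2)) := by
    rw [← hk]
    exact gfold stB.1 d rt stB.2 parent.keys parent PySem.Dict.empty PySem.Dict.empty
      hG (fun _ h => h) rfl (fun p hp => by simp [PySem.Dict.empty, PySem.Dict.items] at hp)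
  show ((parent.keys.foldl groupStepA
      ((PySem.Dict.empty : PySem.Dict String (PySem.Set String)), parent)).1.values).filter
        (fun g => decide (1 < PySem.Set.len g)) = _
  show _ = ((stB.1.keys.foldl (groupStepB stB.1)
      (PySem.Dict.empty : PySem.Dict Int (PySem.Set String))).values).filter
        (fun g => decide (1 < PySem.Set.len g))
  have hvals : (parent.keys.foldl groupStepA
        ((PySem.Dict.empty : PySem.Dict String (PySem.Set String)), parent)).1.values =
      (stB.1.keys.foldl (groupStepB stB.1)
        (PySem.Dict.empty : PySem.Dict Int (PySem.Set String))).values := by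
    simp only [PySem.Dict.values]
    rw [hitems, List.map_map]
    rfl
  rw [hvals]

theorem group_pairs_py_spec : Claim_equal_group_pairs_py := by
  intro pairs _
  unfold Spec_group_pairs_py
  exact ab_eq pairs
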